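-- pv_equiv track=rewrite | github.com/aleksaa01/codefights | Arcade/The_Core/additionWithoutCarrying.py | additionWithoutCarrying
-- ===== SOURCE A (Python) =====
-- def additionWithoutCarrying(param1, param2):
--     boys_result = 0
--     mul = 1
--
--     while param1 or param2:
--         v1 = param1 % 10
--         v2 = param2 % 10
--
--         param1 //= 10
--         param2 //= 10
--
--         boys_result += ((v1 + v2) % 10) * mul
--         mul *= 10
--
--     return boys_result
-- ===== SOURCE B (Python) =====
-- def additionWithoutCarrying(param1, param2):
--     s1, s2 = str(param1), str(param2)
--     n = max(len(s1), len(s2))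
--     result = 0
--     for c1, c2 in zip(s1.zfill(n), s2.zfill(n)):
--         result = result * 10 + (int(c1) + int(c2)) % 10
--     return result
-- ===== Notes on version B (the rewrite author's own statement) =====
-- stated objective: alternative
-- what changed: B computes the no-carry sum over the zero-padded decimal string representations (str + zfill + zip with a big-endian Horner fold) instead of A's numeric while-loop peeling digits with % 10 and // 10 into a positional accumulator.
import Mathlib
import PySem

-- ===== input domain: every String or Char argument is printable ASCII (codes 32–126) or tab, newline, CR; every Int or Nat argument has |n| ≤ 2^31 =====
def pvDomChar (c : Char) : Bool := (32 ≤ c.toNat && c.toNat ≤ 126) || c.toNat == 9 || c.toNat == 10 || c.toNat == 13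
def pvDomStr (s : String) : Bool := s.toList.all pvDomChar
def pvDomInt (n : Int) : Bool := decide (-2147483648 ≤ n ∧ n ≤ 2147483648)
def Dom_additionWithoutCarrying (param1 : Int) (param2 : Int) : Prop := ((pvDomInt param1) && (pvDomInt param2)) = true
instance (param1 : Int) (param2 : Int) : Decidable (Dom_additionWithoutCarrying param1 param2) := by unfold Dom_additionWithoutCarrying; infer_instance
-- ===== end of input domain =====

-- B re-implements the digit-wise no-carry sum over the aligned decimal strings (str/zfill/zip
-- + a Horner fold) instead of A's numeric divmod accumulator loop; objective: alternative.

-- ===== PORT A =====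
-- the while-loop of A; fuel makes it total (on Pre_ inputs the fuel below always suffices,
-- matching Python step for step; on negative inputs Python's loop never terminates)
def awcLoop : Nat → Int → Int → Int → Int → Int
  | 0, _, _, boys_result, _ => boys_result
  | fuel + 1, param1, param2, boys_result, mul =>
    if param1 ≠ 0 ∨ param2 ≠ 0 then
      awcLoop fuel (PySem.Int.floordiv param1 10) (PySem.Int.floordiv param2 10)
        (boys_result +
          PySem.Int.mod (PySem.Int.mod param1 10 + PySem.Int.mod param2 10) 10 * mul)
        (mul * 10)
    else boys_result

def additionWithoutCarrying (param1 : Int) (param2 : Int) : Int :=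
  awcLoop (param1.natAbs + param2.natAbs + 1) param1 param2 0 1

-- ===== PORT B =====
-- int(c) for a one-character string c: exactly Python's int() (none = ValueError → getD
-- unreachable on Pre_ inputs, where every aligned character is a decimal digit)
def awcDigitVal (c : Char) : Int := (PySem.Int.ofChars? [c]).getD 0

def additionWithoutCarrying_alt (param1 : Int) (param2 : Int) : Int :=
  let s1 := PySem.Int.toChars param1
  let s2 := PySem.Int.toChars param2
  let n : Int := max (PySem.Chars.len s1) (PySem.Chars.len s2)
  ((PySem.Chars.zfill s1 n).zip (PySem.Chars.zfill s2 n)).foldl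
    (fun result p => result * 10 + PySem.Int.mod (awcDigitVal p.1 + awcDigitVal p.2) 10) 0

-- ===== PRECONDITION & SPEC =====
-- Pre_ excludes exactly the inputs with a negative argument: there Python's A never
-- terminates ('param1 //= 10' converges to -1, which stays truthy), so A returns no value.
def Pre_additionWithoutCarrying (param1 : Int) (param2 : Int) : Prop :=
  0 ≤ param1 ∧ 0 ≤ param2
instance (param1 : Int) (param2 : Int) : Decidable (Pre_additionWithoutCarrying param1 param2) := by
  unfold Pre_additionWithoutCarrying; infer_instance

def pvWitness_additionWithoutCarrying : Int × Int := (456, 1734)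

def Spec_additionWithoutCarrying (param1 : Int) (param2 : Int) (out : Int) : Prop :=
  out = additionWithoutCarrying_alt param1 param2
instance (param1 : Int) (param2 : Int) (out : Int) : Decidable (Spec_additionWithoutCarrying param1 param2 out) := by
  unfold Spec_additionWithoutCarrying; infer_instance

-- ===== CLAIM (what is proved, stated in full; the proofs are below) =====
def Claim_equal_additionWithoutCarrying : Prop := ∀ (param1 : Int) (param2 : Int), Dom_additionWithoutCarrying param1 param2 → Pre_additionWithoutCarrying param1 param2 → Spec_additionWithoutCarrying param1 param2 (additionWithoutCarrying param1 param2)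

-- ===== LEMMAS AND PROOFS =====

-- the mathematical digit-wise no-carry sum, little-endian recursion
def noCarry (a b : Nat) : Nat :=
  if a = 0 ∧ b = 0 then 0
  else (a % 10 + b % 10) % 10 + 10 * noCarry (a / 10) (b / 10)
termination_by a + b
decreasing_by
  have ha := Nat.div_le_self a 10
  have hb := Nat.div_le_self b 10
  rcases Nat.eq_zero_or_pos a with h | h
  · have : b ≠ 0 := by tauto
    have := Nat.div_lt_self (Nat.pos_of_ne_zero this) (by norm_num : 1 < 10)
    omega
  · have := Nat.div_lt_self h (by norm_num : 1 < 10)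
    omega

-- little-endian digits of a, right-padded with zeros to length L
def padR (xs : List Nat) (L : Nat) : List Nat := xs ++ List.replicate (L - xs.length) 0

lemma length_padR (xs : List Nat) (L : Nat) (h : xs.length ≤ L) : (padR xs L).length = L := by
  simp [padR]; omega

lemma padR_digits_cons (a L : Nat) (h : (Nat.digits 10 a).length ≤ L + 1) :
    padR (Nat.digits 10 a) (L + 1) = a % 10 :: padR (Nat.digits 10 (a / 10)) L := by
  rcases Nat.eq_zero_or_pos a with rfl | ha
  · simp [padR, List.replicate_succ]
  · rw [Nat.digits_def' (by norm_num : 1 < 10) ha] at h ⊢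
    have hl : L + 1 - (a % 10 :: Nat.digits 10 (a / 10)).length
        = L - (Nat.digits 10 (a / 10)).length := by
      simp
    simp only [padR, List.cons_append, hl]

lemma mem_padR_digits_lt (a L d : Nat) (hd : d ∈ padR (Nat.digits 10 a) L) : d < 10 := by
  rcases List.mem_append.1 hd with h | h
  · exact Nat.digits_lt_base (by norm_num) h
  · have := List.eq_of_mem_replicate h
    omega

-- A's loop computes noCarry (given enough fuel and nonnegative arguments)
lemma awcLoop_eq (fuel : Nat) : ∀ (a b : Nat) (acc mul : Int), a + b < fuel →
    awcLoop fuel (a : Int) (b : Int) acc mul = acc + mul * (noCarry a b : Int) := by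
  induction fuel with
  | zero => intro a b acc mul h; omega
  | succ fuel ih =>
    intro a b acc mul h
    rw [awcLoop]
    by_cases hz : a = 0 ∧ b = 0
    · obtain ⟨rfl, rfl⟩ := hz
      rw [noCarry]
      norm_num
    · have hcond : (a : Int) ≠ 0 ∨ (b : Int) ≠ 0 := by
        rcases Decidable.not_and_iff_or_not.1 hz with h' | h'
        · exact Or.inl (by exact_mod_cast h')
        · exact Or.inr (by exact_mod_cast h')
      rw [if_pos hcond]
      have hdiv : ∀ n : Nat, PySem.Int.floordiv (n : Int) 10 = ((n / 10 : Nat) : Int) := by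
        intro n
        rw [PySem.Int.floordiv_eq_ediv_of_pos (by norm_num)]
        exact_mod_cast (Int.natCast_div n 10).symm
      have hmod : ∀ n : Nat, PySem.Int.mod (n : Int) 10 = ((n % 10 : Nat) : Int) := by
        intro n
        rw [PySem.Int.mod_eq_emod_of_pos (by norm_num)]
        exact_mod_cast (Int.natCast_mod n 10).symm
      rw [hdiv, hdiv, hmod, hmod]
      have hsum : ((a % 10 : Nat) : Int) + ((b % 10 : Nat) : Int) = ((a % 10 + b % 10 : Nat) : Int) := by
        push_cast; ring
      rw [hsum, hmod]
      have hfuel : a / 10 + b / 10 < fuel := by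
        have ha := Nat.div_le_self a 10
        have hb := Nat.div_le_self b 10
        rcases Decidable.not_and_iff_or_not.1 hz with h' | h'
        · have := Nat.div_lt_self (Nat.pos_of_ne_zero h') (by norm_num : 1 < 10)
          omega
        · have := Nat.div_lt_self (Nat.pos_of_ne_zero h') (by norm_num : 1 < 10)
          omega
      rw [ih (a / 10) (b / 10) _ _ hfuel]
      conv_rhs => rw [noCarry, if_neg hz]
      push_cast
      ring

-- noCarry as the value of the zipped, padded little-endian digit lists
lemma noCarry_eq_ofDigits : ∀ (L a b : Nat), (Nat.digits 10 a).length ≤ L →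
    (Nat.digits 10 b).length ≤ L →
    noCarry a b = Nat.ofDigits 10 (List.zipWith (fun x y => (x + y) % 10)
      (padR (Nat.digits 10 a) L) (padR (Nat.digits 10 b) L)) := by
  intro L
  induction L with
  | zero =>
    intro a b ha hb
    have ha0 : a = 0 := by
      have := Nat.digits_eq_nil_iff_eq_zero.1 (List.eq_nil_of_length_eq_zero (Nat.le_zero.1 ha))
      exact this
    have hb0 : b = 0 := by
      have := Nat.digits_eq_nil_iff_eq_zero.1 (List.eq_nil_of_length_eq_zero (Nat.le_zero.1 hb))
      exact this
    subst ha0; subst hb0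
    rw [noCarry]
    simp [padR]
  | succ L ih =>
    intro a b ha hb
    rw [padR_digits_cons a L ha, padR_digits_cons b L hb]
    have hla : (Nat.digits 10 (a / 10)).length ≤ L := by
      rcases Nat.eq_zero_or_pos a with rfl | h
      · simp
      · rw [Nat.digits_def' (by norm_num : 1 < 10) h] at ha
        simpa using Nat.lt_succ_iff.1 (by simpa using ha)
    have hlb : (Nat.digits 10 (b / 10)).length ≤ L := by
      rcases Nat.eq_zero_or_pos b with rfl | h
      · simp
      · rw [Nat.digits_def' (by norm_num : 1 < 10) h] at hb
        simpa using Nat.lt_succ_iff.1 (by simpa using hb)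
    rw [List.zipWith_cons_cons, Nat.ofDigits_cons, ← ih (a / 10) (b / 10) hla hlb]
    rw [noCarry]
    by_cases hz : a = 0 ∧ b = 0
    · obtain ⟨rfl, rfl⟩ := hz
      rw [if_pos ⟨rfl, rfl⟩, noCarry]
      simp
    · rw [if_neg hz]

-- characterisation of Nat.toDigits (core's decimal printer)
lemma toDigitsCore_eq (fuel : Nat) : ∀ (n : Nat) (ds : List Char), 0 < n → n < fuel →
    Nat.toDigitsCore 10 fuel n ds =
      ((Nat.digits 10 n).reverse.map Nat.digitChar) ++ ds := by
  induction fuel with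
  | zero => intro n ds h1 h2; omega
  | succ fuel ih =>
    intro n ds h1 h2
    rw [Nat.toDigitsCore]
    by_cases hq : n / 10 = 0
    · have hn : n < 10 := by omega
      rw [if_pos hq, Nat.digits_def' (by norm_num : 1 < 10) h1, hq]
      simp [Nat.mod_eq_of_lt hn]
    · rw [if_neg hq]
      have h10 : 10 ≤ n := by
        by_contra hlt
        exact hq (Nat.div_eq_of_lt (by omega))
      have hrec : n / 10 < fuel := by
        have := Nat.div_lt_self h1 (by norm_num : 1 < 10)
        omega
      rw [ih (n / 10) _ (Nat.pos_of_ne_zero hq) hrec]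
      rw [Nat.digits_def' (by norm_num : 1 < 10) h1]
      simp

lemma toDigits_pos (n : Nat) (h : 0 < n) :
    Nat.toDigits 10 n = (Nat.digits 10 n).reverse.map Nat.digitChar := by
  rw [Nat.toDigits, toDigitsCore_eq (n + 1) n [] h (by omega)]
  simp

lemma toDigits_zero : Nat.toDigits 10 0 = ['0'] := by decide

lemma digitChar_ne_sign (d : Nat) (h : d < 10) :
    ¬(Nat.digitChar d = '+' ∨ Nat.digitChar d = '-') := by
  interval_cases d <;> decide

lemma digits_length_le_toDigits (a : Nat) :
    (Nat.digits 10 a).length ≤ (Nat.toDigits 10 a).length := by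
  rcases Nat.eq_zero_or_pos a with rfl | h
  · simp
  · rw [toDigits_pos a h]; simp

-- zfill of str(a) is the reversed, zero-padded digit list rendered as characters
lemma zfill_nosign (c : Char) (rest : List Char) (m : Nat)
    (hc : ¬(c = '+' ∨ c = '-')) :
    PySem.Chars.zfill (c :: rest) (m : Int) =
      List.replicate (m - (c :: rest).length) '0' ++ (c :: rest) := by
  simp only [PySem.Chars.zfill, Int.toNat_natCast]
  split_ifs with h1
  · have h0 : m - (c :: rest).length = 0 := by
      rw [List.length_cons] at h1 ⊢
      push_cast at h1
      omega
    rw [h0]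
    simp
  · rfl

lemma zfill_toDigits (a m : Nat) (h1 : (Nat.toDigits 10 a).length ≤ m) (h2 : 1 ≤ m) :
    PySem.Chars.zfill (Nat.toDigits 10 a) (m : Int) =
      (padR (Nat.digits 10 a) m).reverse.map Nat.digitChar := by
  rcases Nat.eq_zero_or_pos a with rfl | ha
  · rw [toDigits_zero, zfill_nosign '0' [] m (by decide)]
    have h0 : Nat.digitChar 0 = '0' := by decide
    rw [show (m - ([('0' : Char)] : List Char).length) = m - 1 by simp]
    rw [← List.replicate_succ']
    rw [show m - 1 + 1 = m from by omega]
    simp [padR, h0]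
  · have hne : Nat.digits 10 a ≠ [] := Nat.digits_ne_nil_iff_ne_zero.2 (by omega)
    rw [toDigits_pos a ha] at h1 ⊢
    obtain ⟨c, rest, hcr⟩ :=
      List.exists_cons_of_ne_nil (l := (Nat.digits 10 a).reverse.map Nat.digitChar)
        (by simp [hne])
    have hcmem : c ∈ (Nat.digits 10 a).reverse.map Nat.digitChar := by
      rw [hcr]; exact List.mem_cons_self
    have hcdigit : ¬(c = '+' ∨ c = '-') := by
      rw [List.mem_map] at hcmem
      obtain ⟨d, hd, rfl⟩ := hcmem
      exact digitChar_ne_sign d (Nat.digits_lt_base (by norm_num) (List.mem_reverse.1 hd))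
    rw [hcr, zfill_nosign c rest m hcdigit, ← hcr]
    simp only [padR, List.reverse_append, List.reverse_replicate, List.map_append,
      List.map_replicate]
    have h0 : Nat.digitChar 0 = '0' := by decide
    rw [h0]
    congr 1
    simp

lemma awcDigitVal_digitChar (d : Nat) (h : d < 10) :
    awcDigitVal (Nat.digitChar d) = (d : Int) := by
  interval_cases d <;> decide

lemma mod10_natCast (n : Nat) : PySem.Int.mod (n : Int) 10 = ((n % 10 : Nat) : Int) := by
  rw [PySem.Int.mod_eq_emod_of_pos (by norm_num)]
  exact_mod_cast (Int.natCast_mod n 10).symm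

-- Horner fold over the big-endian character pairs = ofDigits of the little-endian pair list
lemma foldl_horner : ∀ (l : List (Nat × Nat)), (∀ p ∈ l, p.1 < 10 ∧ p.2 < 10) →
    List.foldl (fun (r : Int) (p : Char × Char) =>
        r * 10 + PySem.Int.mod (awcDigitVal p.1 + awcDigitVal p.2) 10) 0
      ((l.map (Prod.map Nat.digitChar Nat.digitChar)).reverse) =
    ((Nat.ofDigits 10 (l.map fun p => (p.1 + p.2) % 10) : Nat) : Int) := by
  intro l
  induction l with
  | nil => simp [Nat.ofDigits_nil]
  | cons p l ih =>
    intro h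
    have hp := h p List.mem_cons_self
    simp only [List.map_cons, List.reverse_cons, List.foldl_append, List.foldl_cons,
      List.foldl_nil]
    rw [ih (fun q hq => h q (List.mem_cons_of_mem p hq))]
    rw [Nat.ofDigits_cons]
    show _ * 10 + PySem.Int.mod (awcDigitVal (Nat.digitChar p.1) + awcDigitVal (Nat.digitChar p.2)) 10 = _
    rw [awcDigitVal_digitChar p.1 hp.1, awcDigitVal_digitChar p.2 hp.2]
    rw [show (p.1 : Int) + (p.2 : Int) = ((p.1 + p.2 : Nat) : Int) by push_cast; ring]
    rw [mod10_natCast]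
    push_cast
    ring

lemma zip_rev {α β : Type} (x : List α) (y : List β) (h : x.length = y.length) :
    x.reverse.zip y.reverse = (x.zip y).reverse := by
  induction x generalizing y with
  | nil => cases y <;> simp_all
  | cons a x ih =>
    cases y with
    | nil => simp at h
    | cons b y =>
      simp only [List.reverse_cons]
      rw [List.zip_append (by have := h; simp at this ⊢; omega)]
      rw [ih y (by simpa using h)]
      simp

lemma toChars_natCast (a : Nat) : PySem.Int.toChars (a : Int) = Nat.toDigits 10 a := by
  simp [PySem.Int.toChars]

lemma one_le_toDigits_length (a : Nat) : 1 ≤ (Nat.toDigits 10 a).length := by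
  rcases Nat.eq_zero_or_pos a with rfl | h
  · rw [toDigits_zero]; simp
  · rw [toDigits_pos a h]
    have hne : Nat.digits 10 a ≠ [] :=
      Nat.digits_ne_nil_iff_ne_zero.2 (by omega : a ≠ 0)
    have := List.length_pos_iff.mpr hne
    simp only [List.length_map, List.length_reverse]
    omega

lemma alt_eq (a b : Nat) : additionWithoutCarrying_alt (a : Int) (b : Int) = (noCarry a b : Int) := by
  simp only [additionWithoutCarrying_alt, toChars_natCast]
  have hlen : ∀ cs : List Char, PySem.Chars.len cs = (cs.length : Int) := by
    intro cs; simp [PySem.Chars.len]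
  rw [hlen, hlen]
  set N : Nat := max (Nat.toDigits 10 a).length (Nat.toDigits 10 b).length with hN
  have hmax : max ((Nat.toDigits 10 a).length : Int) ((Nat.toDigits 10 b).length : Int)
      = (N : Int) := by rw [hN]; push_cast [Nat.cast_max]; rfl
  rw [hmax]
  have h1N : 1 ≤ N := le_trans (one_le_toDigits_length a) (le_max_left _ _)
  rw [zfill_toDigits a N (le_max_left _ _) h1N,
      zfill_toDigits b N (le_max_right _ _) h1N]
  have hda : (Nat.digits 10 a).length ≤ N :=
    le_trans (digits_length_le_toDigits a) (le_max_left _ _)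
  have hdb : (Nat.digits 10 b).length ≤ N :=
    le_trans (digits_length_le_toDigits b) (le_max_right _ _)
  rw [List.zip_map,
      zip_rev _ _ (by rw [length_padR _ _ hda, length_padR _ _ hdb]),
      List.map_reverse (l := (padR (Nat.digits 10 a) N).zip (padR (Nat.digits 10 b) N))]
  rw [foldl_horner _ (by
    intro p hp
    rcases p with ⟨x, y⟩
    have := List.of_mem_zip hp
    exact ⟨mem_padR_digits_lt a N x this.1, mem_padR_digits_lt b N y this.2⟩)]
  have hzw : List.map (fun p : Nat × Nat => (p.1 + p.2) % 10)
      ((padR (Nat.digits 10 a) N).zip (padR (Nat.digits 10 b) N))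
      = List.zipWith (fun x y => (x + y) % 10)
          (padR (Nat.digits 10 a) N) (padR (Nat.digits 10 b) N) := by
    rw [← List.map_uncurry_zip_eq_zipWith]
    rfl
  rw [hzw, ← noCarry_eq_ofDigits N a b hda hdb]

-- ===== VERDICT (by name: the statement is the Claim_ definition above) =====
theorem additionWithoutCarrying_spec : Claim_equal_additionWithoutCarrying := by
  intro param1 param2 _ hpre
  obtain ⟨h1, h2⟩ := hpre
  obtain ⟨a, rfl⟩ := Int.eq_ofNat_of_zero_le h1
  obtain ⟨b, rfl⟩ := Int.eq_ofNat_of_zero_le h2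
  unfold Spec_additionWithoutCarrying additionWithoutCarrying
  rw [alt_eq]
  have : (a : Int).natAbs + (b : Int).natAbs + 1 = a + b + 1 := by simp
  rw [this, awcLoop_eq (a + b + 1) a b 0 1 (by omega)]
  ring
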